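-- pv_equiv track=rewrite | github.com/Adireign/BTP-DSD | backend/Main/LogicGates/logicGates.py | evaluate_gate_sequence
-- ===== SOURCE A (Python) =====
-- def evaluate_gate_sequence(gate_sequence, input_values):
--     stack = input_values.copy()
--     for gate_type in gate_sequence:
--         if gate_type == 'AND':
--             stack.append(all(stack))
--         elif gate_type == 'OR':
--             stack.append(any(stack))
--         elif gate_type == 'NOT':
--             stack[-1] = not stack[-1]
--         elif gate_type == 'NAND':
--             stack.append(not all(stack))
--         elif gate_type == 'NOR':
--             stack.append(not any(stack))
--         elif gate_type == 'XOR':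
--             stack.append(sum(stack) % 2 == 1)
--     return stack[-1]
-- ===== SOURCE B (Python) =====
-- def evaluate_gate_sequence(gate_sequence, input_values):
--     # keep a running count of True values, total count, and the top of the stack
--     total = len(input_values)
--     trues = sum(input_values)
--     last = input_values[-1] if input_values else False
--     for g in gate_sequence:
--         if g == 'AND':
--             last = trues == total
--         elif g == 'OR':
--             last = trues > 0
--         elif g == 'NOT':
--             last = not last
--             trues += 1 if last else -1
--             continue
--         elif g == 'NAND':
--             last = trues != total
--         elif g == 'NOR':
--             last = trues == 0
--         elif g == 'XOR':
--             last = trues % 2 == 1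
--         else:
--             continue
--         trues += 1 if last else 0
--         total += 1
--     return last
-- ===== Notes on version B (the rewrite author's own statement) =====
-- stated objective: alternative
-- what changed: B replaces the growing stack (rescanned by all/any/sum at every gate) with three running quantities -- count of True values, total count, and the top value -- updated in constant time per gate; it trades A's stack rescans for an incremental state.
import Mathlib
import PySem

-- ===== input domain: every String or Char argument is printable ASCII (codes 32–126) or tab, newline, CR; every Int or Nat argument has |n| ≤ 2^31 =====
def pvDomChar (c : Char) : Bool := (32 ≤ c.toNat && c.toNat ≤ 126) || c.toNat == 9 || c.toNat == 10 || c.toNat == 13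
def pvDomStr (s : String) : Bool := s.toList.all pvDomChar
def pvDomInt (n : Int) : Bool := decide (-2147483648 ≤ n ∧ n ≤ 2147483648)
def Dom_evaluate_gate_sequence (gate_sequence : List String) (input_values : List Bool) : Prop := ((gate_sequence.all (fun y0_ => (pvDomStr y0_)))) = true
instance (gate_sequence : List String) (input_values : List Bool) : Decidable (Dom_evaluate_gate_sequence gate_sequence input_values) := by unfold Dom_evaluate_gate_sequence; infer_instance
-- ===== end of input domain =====

-- B replaces A's growing stack (rescanned by all/any/sum at every gate) with three running
-- quantities — count of True values, total count, top value — updated incrementally per gate.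


-- ===== PORT A =====
-- one loop iteration of A: the whole stack is kept and rescanned (all/any/sum) at each gate;
-- on 'NOT' with an empty stack Python raises IndexError (excluded by Pre_); the port leaves
-- the stack unchanged there.
def egsStep (stack : List Bool) (gate_type : String) : List Bool :=
  if gate_type = "AND" then stack ++ [stack.all id]
  else if gate_type = "OR" then stack ++ [stack.any id]
  else if gate_type = "NOT" then
    (if stack = [] then stack else stack.dropLast ++ [!(stack.getLastD false)])
  else if gate_type = "NAND" then stack ++ [!(stack.all id)]
  else if gate_type = "NOR" then stack ++ [!(stack.any id)]
  else if gate_type = "XOR" then stack ++ [stack.count true % 2 == 1]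
  else stack

-- final stack[-1]: raises on an empty stack in Python (excluded by Pre_), default false here
def evaluate_gate_sequence (gate_sequence : List String) (input_values : List Bool) : Bool :=
  (gate_sequence.foldl egsStep input_values).getLastD false

-- ===== PORT B =====
-- B's shared tail 'trues += 1 if last else 0; total += 1' after an appending gate
def altPush (trues total : Nat) (last : Bool) : Nat × Nat × Bool :=
  (trues + (if last then 1 else 0), total + 1, last)

-- one loop iteration of B: state = (trues, total, last), updated incrementally
def altStep (st : Nat × Nat × Bool) (g : String) : Nat × Nat × Bool :=
  let t := st.1; let n := st.2.1; let l := st.2.2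
  if g = "AND" then altPush t n (t == n)
  else if g = "OR" then altPush t n (decide (0 < t))
  else if g = "NOT" then
    let v := !l
    (if v then t + 1 else t - 1, n, v)
  else if g = "NAND" then altPush t n (t != n)
  else if g = "NOR" then altPush t n (t == 0)
  else if g = "XOR" then altPush t n (t % 2 == 1)
  else (t, n, l)

def evaluate_gate_sequence_alt (gate_sequence : List String) (input_values : List Bool) : Bool :=
  (gate_sequence.foldl altStep
    (input_values.count true, input_values.length, input_values.getLastD false)).2.2

-- ===== PRECONDITION & SPEC =====
def pvGateP (g : String) : Bool :=
  g == "AND" || g == "OR" || g == "NOT" || g == "NAND" || g == "NOR" || g == "XOR"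

-- Pre_ excludes exactly the inputs where A raises IndexError (stack[-1] on an empty stack):
-- empty input_values with no recognized gate at all, or whose first recognized gate is 'NOT'.
def Pre_evaluate_gate_sequence (gate_sequence : List String) (input_values : List Bool) : Prop :=
  input_values ≠ [] ∨ (gate_sequence.find? pvGateP).getD "NOT" ≠ "NOT"
instance (gate_sequence : List String) (input_values : List Bool) : Decidable (Pre_evaluate_gate_sequence gate_sequence input_values) := by unfold Pre_evaluate_gate_sequence; infer_instance

def pvWitness_evaluate_gate_sequence : List String × List Bool := (["AND", "XOR", "NOT"], [true, false])

def Spec_evaluate_gate_sequence (gate_sequence : List String) (input_values : List Bool) (out : Bool) : Prop := out = evaluate_gate_sequence_alt gate_sequence input_values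
instance (gate_sequence : List String) (input_values : List Bool) (out : Bool) : Decidable (Spec_evaluate_gate_sequence gate_sequence input_values out) := by unfold Spec_evaluate_gate_sequence; infer_instance

-- ===== CLAIM (what is proved, stated in full; the proofs are below) =====
def Claim_equal_evaluate_gate_sequence : Prop := ∀ (gate_sequence : List String) (input_values : List Bool), Dom_evaluate_gate_sequence gate_sequence input_values → Pre_evaluate_gate_sequence gate_sequence input_values → Spec_evaluate_gate_sequence gate_sequence input_values (evaluate_gate_sequence gate_sequence input_values)

-- ===== LEMMAS AND PROOFS =====

lemma all_eq_count (xs : List Bool) : xs.all id = (xs.count true == xs.length) := by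
  induction xs with
  | nil => rfl
  | cons a t ih =>
    cases a <;> simp_all
    cases h : (t.count true == t.length) <;> simp_all
    have := List.count_le_length (l := t) (a := true); omega

lemma any_eq_count (xs : List Bool) : xs.any id = decide (0 < xs.count true) := by
  induction xs with
  | nil => rfl
  | cons a t ih => cases a <;> simp_all

lemma not_any_eq_count (xs : List Bool) : (!(xs.any id)) = (xs.count true == 0) := by
  rw [any_eq_count]
  rcases Nat.eq_zero_or_pos (xs.count true) with h | h <;> simp [h] <;> omega

-- the invariant: B's triple tracks A's stack (true-count, length, last element),
-- provided no 'NOT' is executed on an empty stack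
lemma main_inv (gs : List String) : ∀ (stack : List Bool),
    (stack ≠ [] ∨ (gs.find? pvGateP).getD "NOT" ≠ "NOT") →
    (gs.foldl egsStep stack).getLastD false =
      (gs.foldl altStep (stack.count true, stack.length, stack.getLastD false)).2.2 := by
  induction gs with
  | nil => intro stack _; rfl
  | cons g gs ih =>
    intro stack hpre
    simp only [List.foldl_cons]
    -- a helper fact for every appending gate: the new stack is stack ++ [v]
    have hpush : ∀ v : Bool,
        ((stack ++ [v]).count true, (stack ++ [v]).length, (stack ++ [v]).getLastD false)
          = altPush (stack.count true) stack.length v := by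
      intro v
      simp [altPush, List.count_append]
      cases v <;> simp
    by_cases hA : g = "AND"
    · subst hA
      have hv : stack.all id = (stack.count true == stack.length) := all_eq_count stack
      simp only [egsStep, altStep, reduceIte, hv]
      rw [← hpush]
      exact ih _ (Or.inl (by simp))
    by_cases hO : g = "OR"
    · subst hO
      have hv : stack.any id = decide (0 < stack.count true) := any_eq_count stack
      simp only [egsStep, altStep, hA, reduceIte, hv]
      rw [← hpush]
      exact ih _ (Or.inl (by simp))
    by_cases hN : g = "NOT"
    · subst hN
      -- the stack cannot be empty here: Pre_ forbids a leading NOT on empty input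
      have hne : stack ≠ [] := by
        rcases hpre with h | h
        · exact h
        · intro hnil; subst hnil
          simp [List.find?, pvGateP] at h
      obtain ⟨ys, a, rfl⟩ : ∃ ys a, stack = ys ++ [a] := by
        induction stack using List.reverseRecOn with
        | nil => simp at hne
        | append_singleton ys a _ => exact ⟨ys, a, rfl⟩
      simp only [egsStep, altStep, hA, hO, reduceIte,
        if_neg (by simp : ¬(ys ++ [a] = []))]
      rw [List.dropLast_concat, List.getLastD_concat]
      have hcnt : ((ys ++ [!a]).count true, (ys ++ [!a]).length, (ys ++ [!a]).getLastD false)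
          = (if !a then (ys ++ [a]).count true + 1 else (ys ++ [a]).count true - 1,
             (ys ++ [a]).length, !a) := by
        simp [List.count_append]
        cases a <;> simp
      rw [← hcnt]
      exact ih _ (Or.inl (by simp))
    by_cases hNa : g = "NAND"
    · subst hNa
      have hv : (!(stack.all id)) = (stack.count true != stack.length) := by
        rw [all_eq_count]; cases h : (stack.count true == stack.length) <;> simp_all
      simp only [egsStep, altStep, hA, hO, hN, reduceIte, hv]
      rw [← hpush]
      exact ih _ (Or.inl (by simp))
    by_cases hNo : g = "NOR"
    · subst hNo
      have hv := not_any_eq_count stack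
      simp only [egsStep, altStep, hA, hO, hN, hNa, reduceIte, hv]
      rw [← hpush]
      exact ih _ (Or.inl (by simp))
    by_cases hX : g = "XOR"
    · subst hX
      simp only [egsStep, altStep, hA, hO, hN, hNa, hNo, reduceIte]
      rw [← hpush]
      exact ih _ (Or.inl (by simp))
    · -- unrecognized gate: both sides skip it
      simp only [egsStep, altStep, hA, hO, hN, hNa, hNo, hX, reduceIte]
      apply ih
      rcases hpre with h | h
      · exact Or.inl h
      · refine Or.inr ?_
        rwa [List.find?_cons_of_neg (by simp [pvGateP, hA, hO, hN, hNa, hNo, hX])] at h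

-- ===== VERDICT (by name: the statement is the Claim_ definition above) =====
theorem evaluate_gate_sequence_spec : Claim_equal_evaluate_gate_sequence := by
  intro gs iv _ hpre
  unfold Spec_evaluate_gate_sequence evaluate_gate_sequence evaluate_gate_sequence_alt
  exact main_inv gs iv hpre
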